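-- pv_equiv track=rewrite | github.com/fcarva/gnars-data | scripts/enrich_members.py | _count_proof_records
-- ===== SOURCE A (Python) =====
-- def _count_proof_records(
--     member_id: str,
--     member_address: str,
--     timeline_events: list[dict],
-- ) -> tuple[int, str | None]:
--     proof_kinds = {"proof", "delivery", "media_proof"}
--     lower_member_id = str(member_id or "").strip().lower()
--
--     member_events = []
--     for event in timeline_events:
--         actor = str(event.get("actor") or "").strip().lower()
--         if not lower_member_id or actor != lower_member_id:
--             continue
--
--         kind = str(event.get("kind") or "").strip().lower()
--         if kind in proof_kinds:
--             member_events.append(event)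
--
--     count = len(member_events)
--     dates = [
--         event.get("timestamp") or event.get("created_at") or event.get("date")
--         for event in member_events
--         if event.get("timestamp") or event.get("created_at") or event.get("date")
--     ]
--     last = max(dates) if dates else None
--     return count, last
-- ===== SOURCE B (Python) =====
-- def _count_proof_records(
--     member_id: str,
--     member_address: str,
--     timeline_events: list[dict],
-- ) -> tuple[int, str | None]:
--     proof_kinds = {"proof", "delivery", "media_proof"}
--     lower_member_id = str(member_id or "").strip().lower()
--
--     count = 0
--     last = None
--     for event in timeline_events:
--         actor = str(event.get("actor") or "").strip().lower()
--         if not lower_member_id or actor != lower_member_id: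
--             continue
--         kind = str(event.get("kind") or "").strip().lower()
--         if kind not in proof_kinds:
--             continue
--         count += 1
--         val = event.get("timestamp") or event.get("created_at") or event.get("date")
--         if val and (last is None or val > last):
--             last = val
--     return count, last
-- ===== Notes on version B (the rewrite author's own statement) =====
-- stated objective: simpler
-- what changed: Single pass with a count and a running-maximum accumulator replaces building the member_events list, the dates list comprehension and the separate max() scan.
import Mathlib
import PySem

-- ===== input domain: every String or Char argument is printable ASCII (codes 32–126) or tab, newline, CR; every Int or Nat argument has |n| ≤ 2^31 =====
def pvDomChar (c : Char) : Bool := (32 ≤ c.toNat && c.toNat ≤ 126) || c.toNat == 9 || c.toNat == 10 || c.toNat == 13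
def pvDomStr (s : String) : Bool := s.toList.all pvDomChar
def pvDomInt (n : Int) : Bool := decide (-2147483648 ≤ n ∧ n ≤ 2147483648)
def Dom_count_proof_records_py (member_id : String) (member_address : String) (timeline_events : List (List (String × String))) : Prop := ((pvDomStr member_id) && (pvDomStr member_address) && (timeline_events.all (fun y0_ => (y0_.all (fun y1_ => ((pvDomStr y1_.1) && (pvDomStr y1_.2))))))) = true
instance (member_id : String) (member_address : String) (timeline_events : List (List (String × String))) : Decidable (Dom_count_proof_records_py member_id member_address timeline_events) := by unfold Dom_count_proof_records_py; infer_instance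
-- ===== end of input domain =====

-- ===== PORT A =====
-- B replaces A's member_events list, dates list and separate max() scan by one pass
-- with a count and a running-maximum accumulator (same results; simpler, O(1) extra space).

-- event.get(k): first-match lookup in the event dict
def cprGet (e : List (String × String)) (k : String) : Option String :=
  (PySem.Dict.mk e).get? k

-- `x or y` on optional strings: first operand if it is a truthy (nonempty) string, else y
def cprPyOr (a b : Option String) : Option String :=
  match a with
  | some s => if s = "" then b else s
  | none => b

-- truthiness filter: `some s` for a nonempty string, `none` otherwise
def cprTruthy (o : Option String) : Option String :=
  match o with
  | some s => if s = "" then none else some s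
  | none => none

-- str(event.get("actor") or "").strip().lower()
def cprActor (e : List (String × String)) : String :=
  PySem.Str.lower (PySem.Str.strip ((cprGet e "actor").getD ""))

-- str(event.get("kind") or "").strip().lower()
def cprKind (e : List (String × String)) : String :=
  PySem.Str.lower (PySem.Str.strip ((cprGet e "kind").getD ""))

-- event.get("timestamp") or event.get("created_at") or event.get("date"), kept only if truthy
def cprDate? (e : List (String × String)) : Option String :=
  cprTruthy (cprPyOr (cprGet e "timestamp")
    (cprPyOr (cprGet e "created_at") (cprGet e "date")))

def cprProofKinds : PySem.Set String := PySem.Set.ofList ["proof", "delivery", "media_proof"]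

def count_proof_records_py (member_id : String) (member_address : String) (timeline_events : List (List (String × String))) : Int × Option String :=
  let lower_member_id := PySem.Str.lower (PySem.Str.strip member_id)
  let member_events := timeline_events.foldl (fun acc event =>
    if lower_member_id = "" || cprActor event != lower_member_id then acc
    else if cprProofKinds.contains (cprKind event) then acc ++ [event] else acc) []
  let count : Int := member_events.length
  let dates := member_events.filterMap cprDate?
  let last := if dates.isEmpty then none else PySem.List.max? dates (fun x => x)
  (count, last)

-- ===== PORT B =====
def count_proof_records_py_alt (member_id : String) (member_address : String) (timeline_events : List (List (String × String))) : Int × Option String :=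
  let lower_member_id := PySem.Str.lower (PySem.Str.strip member_id)
  timeline_events.foldl (fun (st : Int × Option String) event =>
    if lower_member_id = "" || cprActor event != lower_member_id then st
    else if ! cprProofKinds.contains (cprKind event) then st
    else
      let count := st.1 + 1
      match cprDate? event with
      | none => (count, st.2)
      | some v =>
        match st.2 with
        | none => (count, some v)
        | some m => if m < v then (count, some v) else (count, some m)) (0, none)

-- ===== PRECONDITION & SPEC =====
def Spec_count_proof_records_py (member_id : String) (member_address : String) (timeline_events : List (List (String × String))) (out : Int × Option String) : Prop := out = count_proof_records_py_alt member_id member_address timeline_events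
instance (member_id : String) (member_address : String) (timeline_events : List (List (String × String))) (out : Int × Option String) : Decidable (Spec_count_proof_records_py member_id member_address timeline_events out) := by unfold Spec_count_proof_records_py; infer_instance

-- ===== CLAIM (what is proved, stated in full; the proofs are below) =====
def Claim_equal_count_proof_records_py : Prop := ∀ (member_id : String) (member_address : String) (timeline_events : List (List (String × String))), Dom_count_proof_records_py member_id member_address timeline_events → Spec_count_proof_records_py member_id member_address timeline_events (count_proof_records_py member_id member_address timeline_events)

-- ===== LEMMAS AND PROOFS =====

-- the combined event filter used by both loops
def cprKeep (lm : String) (e : List (String × String)) : Bool :=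
  !(lm = "" || cprActor e != lm) && cprProofKinds.contains (cprKind e)

-- the running-maximum step of B (and of PySem.List.max? at key = id)
def cprStep (o : Option String) (v : String) : Option String :=
  match o with
  | none => some v
  | some m => if m < v then some v else some m

lemma cprA_fold_eq_filter (lm : String) (l : List (List (String × String))) (acc : List (List (String × String))) :
    l.foldl (fun acc event =>
      if lm = "" || cprActor event != lm then acc
      else if cprProofKinds.contains (cprKind event) then acc ++ [event] else acc) acc
      = acc ++ List.filter (cprKeep lm) l := by
  have h : ∀ acc, l.foldl (fun acc event =>
      if cprKeep lm event then acc ++ [event] else acc) acc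
      = acc ++ List.map id (List.filter (cprKeep lm) l) :=
    fun acc => PySem.List.foldl_append_if (cprKeep lm) id l acc
  have hfun : (fun (acc : List (List (String × String))) event =>
      if lm = "" || cprActor event != lm then acc
      else if cprProofKinds.contains (cprKind event) then acc ++ [event] else acc)
      = (fun acc event => if cprKeep lm event then acc ++ [event] else acc) := by
    funext acc e
    by_cases h1 : (lm = "" || cprActor e != lm) = true <;>
      by_cases h2 : cprProofKinds.contains (cprKind e) = true <;>
      simp [cprKeep, h1, h2, List.contains_iff_mem]
  rw [hfun, h, List.map_id]

lemma cprB_fold_eq (lm : String) (l : List (List (String × String))) (c : Int) (o : Option String) :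
    l.foldl (fun (st : Int × Option String) event =>
      if lm = "" || cprActor event != lm then st
      else if ! cprProofKinds.contains (cprKind event) then st
      else
        let count := st.1 + 1
        match cprDate? event with
        | none => (count, st.2)
        | some v =>
          match st.2 with
          | none => (count, some v)
          | some m => if m < v then (count, some v) else (count, some m)) (c, o)
      = (c + ((List.filter (cprKeep lm) l).length : Int),
         ((List.filter (cprKeep lm) l).filterMap cprDate?).foldl cprStep o) := by
  induction l generalizing c o with
  | nil => simp
  | cons e t ih =>
    by_cases h1 : (lm = "" || cprActor e != lm) = true
    · have hk : cprKeep lm e = false := by simp [cprKeep, h1]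
      simp only [List.foldl_cons, h1, if_true, List.filter_cons, hk]
      simpa using ih c o
    · by_cases h2 : cprProofKinds.contains (cprKind e) = true
      · have hk : cprKeep lm e = true := by unfold cprKeep; rw [h2, Bool.and_true]; simpa using h1
        simp only [List.foldl_cons, h1, if_false, h2, Bool.not_true, if_true,
          List.filter_cons, hk]
        cases hd : cprDate? e with
        | none =>
          simp only [hd]
          rw [ih]
          simp [hd, cprStep]
          omega
        | some v =>
          cases o with
          | none =>
            simp only [hd]
            rw [ih]
            simp [hd, cprStep]
            omega
          | some m =>
            by_cases hlt : m < v
            · simp only [hd, hlt, if_true]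
              rw [ih]
              simp [hd, cprStep, hlt]
              omega
            · simp only [hd, hlt, if_false]
              rw [ih]
              simp [hd, cprStep, hlt]
              omega
      · have h2' : cprProofKinds.contains (cprKind e) = false := Bool.eq_false_iff.mpr h2
        have hk : cprKeep lm e = false := by unfold cprKeep; rw [h2', Bool.and_false]
        simp only [List.foldl_cons, h1, if_false, h2, Bool.not_false, if_true,
          List.filter_cons, hk]
        simpa using ih c o

lemma cprMax_eq_foldl (dates : List String) :
    (if dates.isEmpty then none else PySem.List.max? dates (fun x => x))
      = dates.foldl cprStep none := by
  cases dates with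
  | nil => rfl
  | cons d t =>
    show PySem.List.max? (d :: t) (fun x => x) = _
    simp only [PySem.List.max?]
    congr 1
    funext o v
    cases o <;> simp [cprStep]

-- ===== VERDICT (by name: the statement is the Claim_ definition above) =====
theorem count_proof_records_py_spec : Claim_equal_count_proof_records_py := by
  intro member_id member_address timeline_events _
  show count_proof_records_py _ _ _ = _
  unfold count_proof_records_py count_proof_records_py_alt
  dsimp only
  rw [cprB_fold_eq, cprA_fold_eq_filter, List.nil_append, cprMax_eq_foldl]
  norm_num
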